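-- pv_equiv track=rewrite | github.com/ginolhac/mapDamage | mapdamage/align.py | parseCigar
-- ===== SOURCE A (Python) =====
-- def parseCigar(cigarlist, op):
--
--   """ for a specific operation (mismach, match, insertion, deletion... see above
--   return occurences and index in the alignment """
--   tlength = 0
--   coordinate = []
--   # count matches, indels and mismatches
--   oplist = (0, 1, 2, 7, 8)
--   for operation,length in cigarlist:
--     if operation == op:
--         coordinate.append([length, tlength])
--     if operation in oplist:
--         tlength+=length
--   return coordinate
-- ===== SOURCE B (Python) =====
-- from itertools import accumulate
--
-- def parseCigar(cigarlist, op):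
--     """ for a specific operation return occurrences and index in the alignment """
--     advancing = (0, 1, 2, 7, 8)
--     offsets = list(accumulate((l if o in advancing else 0 for o, l in cigarlist),
--                               initial=0))
--     return [[l, offsets[i]] for i, (o, l) in enumerate(cigarlist) if o == op]
-- ===== Notes on version B (the rewrite author's own statement) =====
-- stated objective: alternative
-- what changed: Replaces the single fused filter+accumulate loop by two phases: first a prefix-offset table built with itertools.accumulate over the advancing-op lengths, then an independent selection pass that pairs each matching element with its precomputed offset.
import Mathlib
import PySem

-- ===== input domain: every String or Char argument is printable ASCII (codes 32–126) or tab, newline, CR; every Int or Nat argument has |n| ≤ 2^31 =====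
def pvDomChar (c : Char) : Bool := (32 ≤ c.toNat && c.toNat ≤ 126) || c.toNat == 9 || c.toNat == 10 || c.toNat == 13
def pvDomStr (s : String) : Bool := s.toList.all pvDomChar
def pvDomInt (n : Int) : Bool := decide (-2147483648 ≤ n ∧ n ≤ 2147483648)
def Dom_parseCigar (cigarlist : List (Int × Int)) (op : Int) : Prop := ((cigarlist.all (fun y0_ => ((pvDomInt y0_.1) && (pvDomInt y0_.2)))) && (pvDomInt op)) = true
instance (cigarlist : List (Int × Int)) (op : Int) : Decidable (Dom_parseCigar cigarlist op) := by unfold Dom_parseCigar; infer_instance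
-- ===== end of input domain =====

-- B builds a prefix-offset table first and selects matching ops in a separate pass,
-- instead of A's single fused filter+accumulate loop (objective: alternative).


-- ===== PORT A =====
-- the loop over cigarlist, state = (tlength, coordinate)
def parseCigarGo (op : Int) : List (Int × Int) → Int → List (List Int) → List (List Int)
  | [], _, coordinate => coordinate
  | (operation, length) :: rest, tlength, coordinate =>
      let coordinate' := if operation = op then coordinate ++ [[length, tlength]] else coordinate
      let tlength' := if operation ∈ ([0, 1, 2, 7, 8] : List Int) then tlength + length else tlength
      parseCigarGo op rest tlength' coordinate'

def parseCigar (cigarlist : List (Int × Int)) (op : Int) : List (List Int) :=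
  parseCigarGo op cigarlist 0 []

-- ===== PORT B =====
-- phase 1: prefix-offset table (accumulate over advancing-op lengths, shifted by one,
-- i.e. entry i = total advancing length strictly before element i)
def prefixOffsets : List (Int × Int) → Int → List Int
  | [], _ => []
  | (o, l) :: rest, t =>
      t :: prefixOffsets rest (t + (if o ∈ ([0, 1, 2, 7, 8] : List Int) then l else 0))

-- phase 2: selection pass pairing each element with its precomputed offset
def parseCigar_alt (cigarlist : List (Int × Int)) (op : Int) : List (List Int) :=
  ((cigarlist.zip (prefixOffsets cigarlist 0)).filter (fun p => p.1.1 == op)).map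
    (fun p => [p.1.2, p.2])

-- ===== PRECONDITION & SPEC =====
def Spec_parseCigar (cigarlist : List (Int × Int)) (op : Int) (out : List (List Int)) : Prop := out = parseCigar_alt cigarlist op
instance (cigarlist : List (Int × Int)) (op : Int) (out : List (List Int)) : Decidable (Spec_parseCigar cigarlist op out) := by unfold Spec_parseCigar; infer_instance

-- ===== CLAIM (what is proved, stated in full; the proofs are below) =====
def Claim_equal_parseCigar : Prop := ∀ (cigarlist : List (Int × Int)) (op : Int), Dom_parseCigar cigarlist op → Spec_parseCigar cigarlist op (parseCigar cigarlist op)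

-- ===== LEMMAS AND PROOFS =====

theorem parseCigarGo_eq (op : Int) (l : List (Int × Int)) :
    ∀ (t : Int) (acc : List (List Int)),
      parseCigarGo op l t acc =
        acc ++ ((l.zip (prefixOffsets l t)).filter (fun p => p.1.1 == op)).map
          (fun p => [p.1.2, p.2]) := by
  induction l with
  | nil => intro t acc; simp [parseCigarGo, prefixOffsets]
  | cons hd tl ih =>
      intro t acc
      obtain ⟨o, len⟩ := hd
      simp only [parseCigarGo, prefixOffsets, List.zip_cons_cons, List.filter_cons]
      rw [ih]
      by_cases h : o = op <;> by_cases h2 : o ∈ ([0, 1, 2, 7, 8] : List Int) <;>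
        simp only [List.mem_cons, List.not_mem_nil, or_false] at h2 <;>
        simp [h, h2] <;>
        (rw [h] at h2; by_cases h3 : op = 0 ∨ op = 1 ∨ op = 2 ∨ op = 7 ∨ op = 8 <;>
          simp [h3])

-- ===== VERDICT (by name: the statement is the Claim_ definition above) =====
theorem parseCigar_spec : Claim_equal_parseCigar := by
  intro cigarlist op _
  unfold Spec_parseCigar parseCigar parseCigar_alt
  simpa using parseCigarGo_eq op cigarlist 0 []
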